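-- pv_equiv track=rewrite | github.com/rahoutz/hamiltonian-truncation | hamiltonian-truncation.py | l_total
-- ===== SOURCE A (Python) =====
-- def the_l(ix_arg):
--     if ix_arg == 0:
--         return 0
--     elif ix_arg % 2 != 0:
--         return int((ix_arg+1) / 2)
--     else:
--         return int(ix_arg/2)
--
-- def l_total(state):
--     l_sum = 0
--     for i in range(1, len(state)):
--         if i % 2 != 0:
--             l_sum = l_sum + state[i] * the_l(i)
--         else:
--             l_sum = l_sum-state[i] * the_l(i)
--     return l_sum
-- ===== SOURCE B (Python) =====
-- def l_total(state):
--     # Stage 1: indices 2k-1 and 2k carry the same weight k with opposite signs,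
--     # so only the differences d_k = state[2k-1] - state[2k] matter.
--     n = len(state)
--     diffs = [state[i] - (state[i + 1] if i + 1 < n else 0) for i in range(1, n, 2)]
--     # Stage 2: sum_k k*d_k is the sum of all suffix sums of diffs; one reversed
--     # pass with a running suffix accumulator computes it without multiplication.
--     total = 0
--     suffix = 0
--     for x in reversed(diffs):
--         suffix += x
--         total += suffix
--     return total
-- ===== Notes on version B (the rewrite author's own statement) =====
-- stated objective: faster
-- what changed: Replaces the weighted per-index loop with its the_l helper calls by a two-stage multiplication-free algorithm: first build the list of pairwise differences state[2k-1]-state[2k] (same weight, opposite signs), then compute sum_k k*d_k as the sum of all suffix sums of that list via one reversed pass with a running suffix accumulator.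
import Mathlib
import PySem

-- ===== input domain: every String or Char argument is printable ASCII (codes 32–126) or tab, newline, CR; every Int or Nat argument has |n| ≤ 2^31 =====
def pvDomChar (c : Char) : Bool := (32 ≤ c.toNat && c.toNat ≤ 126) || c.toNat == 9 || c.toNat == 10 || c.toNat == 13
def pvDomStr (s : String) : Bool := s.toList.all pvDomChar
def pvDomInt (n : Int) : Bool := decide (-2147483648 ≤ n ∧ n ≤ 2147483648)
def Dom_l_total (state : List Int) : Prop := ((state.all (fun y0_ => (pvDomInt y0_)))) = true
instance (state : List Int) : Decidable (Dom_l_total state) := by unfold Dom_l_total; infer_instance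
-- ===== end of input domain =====

-- B drops the per-index weighted loop and the the_l helper for a multiplication-free
-- two-stage algorithm: pairwise differences, then a reversed suffix-sum pass (objective: faster,
-- constant factor, measured).

-- ===== PORT A =====
-- the_l: Python's int((ix+1)/2) / int(ix/2) are exact here (the numerator is even),
-- so floor division computes the same value.
def the_l (ix : Int) : Int :=
  if ix = 0 then 0
  else if PySem.Int.mod ix 2 ≠ 0 then PySem.Int.floordiv (ix + 1) 2
  else PySem.Int.floordiv ix 2

-- state[i] is always in range (1 ≤ i < len(state)), so the default 0 is never used.
def l_total (state : List Int) : Int :=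
  (PySem.List.pyRange 1 state.length 1).foldl
    (fun l_sum i =>
      if PySem.Int.mod i 2 ≠ 0 then l_sum + (PySem.List.pyGetD state i 0) * the_l i
      else l_sum - (PySem.List.pyGetD state i 0) * the_l i) 0

-- ===== PORT B =====
-- Source B: diffs comprehension over range(1, n, 2), then the reversed fold carrying (total, suffix).
def l_total_alt (state : List Int) : Int :=
  let diffs := (PySem.List.pyRange 1 state.length 2).map
    (fun i => PySem.List.pyGetD state i 0 -
      (if i + 1 < (state.length : Int) then PySem.List.pyGetD state (i + 1) 0 else 0))
  let r := diffs.reverse.foldl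
    (fun (p : Int × Int) x => (p.1 + (p.2 + x), p.2 + x)) (0, 0)
  r.1

-- ===== PRECONDITION & SPEC =====
def Spec_l_total (state : List Int) (out : Int) : Prop := out = l_total_alt state
instance (state : List Int) (out : Int) : Decidable (Spec_l_total state out) := by unfold Spec_l_total; infer_instance

-- ===== CLAIM (what is proved, stated in full; the proofs are below) =====
def Claim_equal_l_total : Prop := ∀ (state : List Int), Dom_l_total state → Spec_l_total state (l_total state)

-- ===== LEMMAS AND PROOFS =====

/-- The per-index contribution of A's loop body. -/
def fA (state : List Int) (i : Int) : Int :=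
  if PySem.Int.mod i 2 ≠ 0 then (PySem.List.pyGetD state i 0) * the_l i
  else -((PySem.List.pyGetD state i 0) * the_l i)

/-- The pairwise difference B builds. -/
def dfun (state : List Int) (i : Int) : Int :=
  PySem.List.pyGetD state i 0 -
    (if i + 1 < (state.length : Int) then PySem.List.pyGetD state (i + 1) 0 else 0)

/-- Weighted sum Σ (j+1)·l_j (1-based position weights). -/
def W : List Int → Int
  | [] => 0
  | a :: t => a + t.sum + W t

theorem foldlA_eq_sum (state : List Int) (l : List Int) (acc : Int) :
    l.foldl (fun l_sum i =>
      if PySem.Int.mod i 2 ≠ 0 then l_sum + (PySem.List.pyGetD state i 0) * the_l i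
      else l_sum - (PySem.List.pyGetD state i 0) * the_l i) acc
    = acc + (l.map (fA state)).sum := by
  induction l generalizing acc with
  | nil => simp
  | cons a t ih =>
      simp only [List.foldl_cons, List.map_cons, List.sum_cons, ih, fA]
      split_ifs <;> ring

theorem the_l_odd (k : Nat) : the_l (2 * (k : Int) - 1) = (k : Int) := by
  have h1 : (2 * (k : Int) - 1) ≠ 0 := by omega
  rw [the_l, if_neg h1, if_pos (by simp),
    PySem.Int.floordiv_eq_ediv_of_pos (by omega : (0:Int) < 2)]
  omega

theorem the_l_even (k : Nat) (hk : 1 ≤ k) : the_l (2 * (k : Int)) = (k : Int) := by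
  have h1 : (2 * (k : Int)) ≠ 0 := by omega
  rw [the_l, if_neg h1, if_neg (by simp),
    PySem.Int.floordiv_eq_ediv_of_pos (by omega : (0:Int) < 2)]
  omega

theorem pyRange_nil (a b : Int) (h : b ≤ a) : PySem.List.pyRange a b 1 = [] := by
  rw [PySem.List.pyRange_one]
  have : (b - a).toNat = 0 := by omega
  simp [this]

theorem pyRange2_nil (a b : Int) (h : b ≤ a) : PySem.List.pyRange a b 2 = [] := by
  rw [PySem.List.pyRange_of_pos a b (by omega : (0:Int) < 2)]
  rw [if_neg (by omega)]
  simp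

theorem pyRange2_cons (a b : Int) (h : a < b) :
    PySem.List.pyRange a b 2 = a :: PySem.List.pyRange (a + 2) b 2 := by
  rw [PySem.List.pyRange_of_pos a b (by omega : (0:Int) < 2),
      PySem.List.pyRange_of_pos (a + 2) b (by omega : (0:Int) < 2)]
  rw [if_pos h]
  by_cases h2 : a + 2 < b
  · rw [if_pos h2]
    have hc : ((b - a + 2 - 1) / 2).toNat = ((b - (a + 2) + 2 - 1) / 2).toNat + 1 := by omega
    rw [hc, List.range_succ_eq_map]
    simp only [List.map_cons, List.map_map]
    congr 1
    · simp
    · apply List.map_congr_left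
      intro k _
      simp only [Function.comp_apply]
      push_cast
      ring
  · rw [if_neg h2]
    have hc : ((b - a + 2 - 1) / 2).toNat = 1 := by omega
    rw [hc]
    simp

/-- The reversed fold of Source B computes (total + W l + |l|·suffix, suffix + Σ l). -/
theorem foldB_eq (l : List Int) (t s : Int) :
    l.reverse.foldl (fun (p : Int × Int) x => (p.1 + (p.2 + x), p.2 + x)) (t, s)
    = (t + W l + (l.length : Int) * s, s + l.sum) := by
  rw [List.foldl_reverse]
  induction l with
  | nil => simp [W]
  | cons a tl ih =>
      simp only [List.foldr_cons, ih, W, List.sum_cons, List.length_cons, Prod.mk.injEq]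
      constructor <;> (push_cast; ring)

/-- A's tail sum from index 2k-1 equals the shifted weighted sum of B's differences. -/
theorem tailA_eq (state : List Int) :
    ∀ (fuel k : Nat), 1 ≤ k → state.length ≤ 2 * k - 1 + fuel →
    ((PySem.List.pyRange (2 * (k : Int) - 1) state.length 1).map (fA state)).sum
    = W ((PySem.List.pyRange (2 * (k : Int) - 1) state.length 2).map (dfun state))
      + ((k : Int) - 1) *
        ((PySem.List.pyRange (2 * (k : Int) - 1) state.length 2).map (dfun state)).sum := by
  intro fuel
  induction fuel with
  | zero =>
      intro k hk hle
      have h : (state.length : Int) ≤ 2 * (k : Int) - 1 := by omega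
      rw [pyRange_nil _ _ h, pyRange2_nil _ _ h]
      simp [W]
  | succ f ih =>
      intro k hk hle
      by_cases hlt : 2 * (k : Int) - 1 < (state.length : Int)
      · have ihk := ih (k + 1) (by omega) (by omega)
        have hfA1 : fA state (2 * (k : Int) - 1)
            = PySem.List.pyGetD state (2 * (k : Int) - 1) 0 * (k : Int) := by
          simp [fA, the_l_odd]
        rw [PySem.List.pyRange_one_cons hlt, pyRange2_cons _ _ hlt]
        have hstep : 2 * (k : Int) - 1 + 2 = 2 * (((k : Nat) + 1 : Nat) : Int) - 1 := by
          push_cast; ring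
        by_cases h2 : 2 * (k : Int) < (state.length : Int)
        · have hlt2 : (2 * (k : Int) - 1) + 1 < (state.length : Int) := by omega
          rw [PySem.List.pyRange_one_cons hlt2]
          have hs1 : 2 * (k : Int) - 1 + 1 = 2 * (k : Int) := by ring
          have hs2 : 2 * (k : Int) + 1 = 2 * (((k : Nat) + 1 : Nat) : Int) - 1 := by
            push_cast; ring
          have hfA2 : fA state (2 * (k : Int))
              = -(PySem.List.pyGetD state (2 * (k : Int)) 0 * (k : Int)) := by
            simp [fA, the_l_even k hk]
          have hd : dfun state (2 * (k : Int) - 1)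
              = PySem.List.pyGetD state (2 * (k : Int) - 1) 0
                - PySem.List.pyGetD state (2 * (k : Int)) 0 := by
            rw [dfun, if_pos (by omega), hs1]
          rw [hs1, hs2, hstep]
          simp only [List.map_cons, List.sum_cons, W, hfA1, hfA2, hd, ihk]
          push_cast
          ring
        · have hnil1 : PySem.List.pyRange (2 * (k : Int) - 1 + 1) (state.length : Int) 1 = [] :=
            pyRange_nil _ _ (by omega)
          have hnil2 : PySem.List.pyRange (2 * (((k : Nat) + 1 : Nat) : Int) - 1)
              (state.length : Int) 2 = [] :=
            pyRange2_nil _ _ (by push_cast; omega)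
          have hd : dfun state (2 * (k : Int) - 1)
              = PySem.List.pyGetD state (2 * (k : Int) - 1) 0 := by
            rw [dfun, if_neg (by omega)]
            ring
          rw [hstep, hnil1, hnil2]
          simp only [List.map_cons, List.map_nil, List.sum_cons, List.sum_nil, W, hfA1, hd]
          ring
      · have h : (state.length : Int) ≤ 2 * (k : Int) - 1 := by omega
        rw [pyRange_nil _ _ h, pyRange2_nil _ _ h]
        simp [W]

-- ===== VERDICT (by name: the statement is the Claim_ definition above) =====
theorem l_total_spec : Claim_equal_l_total := by
  intro state _
  unfold Spec_l_total l_total l_total_alt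
  rw [foldlA_eq_sum]
  simp only [foldB_eq]
  have h := tailA_eq state state.length 1 le_rfl (by omega)
  norm_num at h ⊢
  exact h
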